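-- pv_equiv track=rewrite | github.com/Ag3497120/verantyx-v6 | synth_results/c9680e90.py | transform
-- ===== SOURCE A (Python) =====
-- def transform(grid):
--     rows,cols=len(grid),len(grid[0])
--     from collections import Counter
--     nine_row=next((r for r in range(rows) if all(grid[r][c]==9 for c in range(cols))),None)
--     if nine_row is None: return grid
--     bg=Counter(v for row in grid for v in row if v!=9).most_common(1)[0][0]
--     out=[list(row) for row in grid]
--     # Upper half: move non-bg values DOWN by 1, but track which have been moved
--     moved=set()
--     for r in range(nine_row-1,-1,-1):
--         for c in range(cols):
--             if grid[r][c]!=bg and (r,c) not in moved: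
--                 nr=r+1
--                 if nr<nine_row:
--                     out[nr][c]=grid[r][c]
--                     if (r,c) not in moved: out[r][c]=bg
--                     moved.add((nr,c))
--     # Lower half: move non-bg UP by 1
--     moved2=set()
--     for r in range(nine_row+1,rows):
--         for c in range(cols):
--             if grid[r][c]!=bg and (r,c) not in moved2:
--                 nr=r-1
--                 if nr>nine_row:
--                     out[nr][c]=grid[r][c]
--                     if (r,c) not in moved2: out[r][c]=bg
--                     moved2.add((nr,c))
--     return out
-- ===== SOURCE B (Python) =====
-- def transform(grid):
--     rows, cols = len(grid), len(grid[0])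
--     from collections import Counter
--     nine_row = next((r for r in range(rows) if all(grid[r][c] == 9 for c in range(cols))), None)
--     if nine_row is None:
--         return grid
--     bg = Counter(v for row in grid for v in row if v != 9).most_common(1)[0][0]
--
--     def upper(R, c):
--         # final value of an upper-half cell: read from the neighbour above
--         if R >= 1 and grid[R-1][c] != bg:
--             return grid[R-1][c]
--         if grid[R][c] != bg and R + 1 < nine_row:
--             return bg
--         return grid[R][c]
--
--     def lower(R, c):
--         # final value of a lower-half cell: read from the neighbour below
--         if R + 1 < rows and grid[R+1][c] != bg:
--             return grid[R+1][c]
--         if grid[R][c] != bg and R > nine_row + 1: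
--             return bg
--         return grid[R][c]
--
--     out = []
--     for R in range(rows):
--         if R < nine_row:
--             out.append([upper(R, c) for c in range(cols)])
--         elif R == nine_row:
--             out.append(list(grid[R]))
--         else:
--             out.append([lower(R, c) for c in range(cols)])
--     return out
-- ===== Notes on version B (the rewrite author's own statement) =====
-- stated objective: simpler
-- what changed: Replaces A's two destructive move-and-clear passes over a mutable copy (with their dead 'moved' bookkeeping sets) by a single read-only pass that computes each output cell directly from its neighbour toward the 9-divider.
-- outside the precondition, e.g. on transform([[], [0]]): A returns [[], [0]], B returns [[], []]; on transform([[9, 9], [9, 9]]): A raises IndexError, B raises IndexError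
import Mathlib
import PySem

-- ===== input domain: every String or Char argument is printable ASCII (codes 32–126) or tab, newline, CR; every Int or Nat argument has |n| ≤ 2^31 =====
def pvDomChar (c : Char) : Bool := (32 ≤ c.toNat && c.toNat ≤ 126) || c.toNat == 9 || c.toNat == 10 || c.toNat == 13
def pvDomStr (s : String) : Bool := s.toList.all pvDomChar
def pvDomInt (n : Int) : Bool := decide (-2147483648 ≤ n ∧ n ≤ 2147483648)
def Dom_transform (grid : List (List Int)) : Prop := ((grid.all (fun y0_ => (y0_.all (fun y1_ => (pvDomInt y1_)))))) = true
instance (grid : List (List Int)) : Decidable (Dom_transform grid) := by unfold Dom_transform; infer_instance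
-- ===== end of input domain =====

-- B replaces A's two destructive move-and-clear loops (with their dead `moved` sets) by a single
-- read-only pass that computes each cell from its neighbour toward the divider; return value only.

-- ===== PORT A =====
-- grid[r][c]; the default 0 is never reached inside Pre_transform (rectangular grids, in-range indices)
def pvCell (g : List (List Int)) (r c : Nat) : Int := (g.getD r []).getD c 0

-- next((r for r in range(rows) if all(grid[r][c]==9 for c in range(cols))), None)
def pvNineRow (g : List (List Int)) (cols : Nat) : Option Nat :=
  (List.range g.length).find? (fun r => (List.range cols).all (fun c => pvCell g r c == 9))

-- Counter(v for row in grid for v in row if v != 9).most_common(1)[0][0]: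
-- first key (in first-insertion order) with maximal count; 0 stands for Python's
-- IndexError on an empty Counter, excluded by Pre_transform.
def pvBg (g : List (List Int)) : Int :=
  let vals := (g.flatMap id).filter (fun v => v ≠ 9)
  match (PySem.Dict.counter vals).items with
  | [] => 0
  | p :: rest => (rest.foldl (fun best q => if best.2 < q.2 then q else best) p).1

-- out[r][c] = v
def pvSet2d (out : List (List Int)) (r c : Nat) (v : Int) : List (List Int) :=
  out.modify r (fun row => row.set c v)

def pvUpStep (g : List (List Int)) (bg : Int) (nine : Nat) (r : Nat)
    (st : List (List Int) × List (Nat × Nat)) (c : Nat) :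
    List (List Int) × List (Nat × Nat) :=
  if pvCell g r c ≠ bg ∧ (r, c) ∉ st.2 then
    if r + 1 < nine then
      (if (r, c) ∉ st.2 then pvSet2d (pvSet2d st.1 (r + 1) c (pvCell g r c)) r c bg
       else pvSet2d st.1 (r + 1) c (pvCell g r c),
       PySem.Set.add st.2 (r + 1, c))
    else st
  else st

def pvLoStep (g : List (List Int)) (bg : Int) (nine : Nat) (r : Nat)
    (st : List (List Int) × List (Nat × Nat)) (c : Nat) :
    List (List Int) × List (Nat × Nat) :=
  if pvCell g r c ≠ bg ∧ (r, c) ∉ st.2 then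
    if nine < r - 1 then
      (if (r, c) ∉ st.2 then pvSet2d (pvSet2d st.1 (r - 1) c (pvCell g r c)) r c bg
       else pvSet2d st.1 (r - 1) c (pvCell g r c),
       PySem.Set.add st.2 (r - 1, c))
    else st
  else st

def transform (grid : List (List Int)) : List (List Int) :=
  let rows := grid.length
  let cols := (grid.getD 0 []).length
  match pvNineRow grid cols with
  | none => grid
  | some nine =>
    let bg := pvBg grid
    let out0 := grid.map (fun row => row)          -- out = [list(row) for row in grid]
    -- for r in range(nine_row-1,-1,-1): for c in range(cols): …
    let st1 := ((List.range nine).reverse).foldl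
      (fun st r => (List.range cols).foldl (pvUpStep grid bg nine r) st)
      (out0, ([] : List (Nat × Nat)))
    -- for r in range(nine_row+1, rows): for c in range(cols): …
    let st2 := (List.range' (nine + 1) (rows - (nine + 1))).foldl
      (fun st r => (List.range cols).foldl (pvLoStep grid bg nine r) st)
      (st1.1, ([] : List (Nat × Nat)))
    st2.1

-- ===== PORT B =====
-- final value of an upper-half cell, read from the neighbour above
def pvUpperCell (g : List (List Int)) (bg : Int) (nine R c : Nat) : Int :=
  if 1 ≤ R ∧ pvCell g (R - 1) c ≠ bg then pvCell g (R - 1) c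
  else if pvCell g R c ≠ bg ∧ R + 1 < nine then bg
  else pvCell g R c

-- final value of a lower-half cell, read from the neighbour below
def pvLowerCell (g : List (List Int)) (bg : Int) (nine rows R c : Nat) : Int :=
  if R + 1 < rows ∧ pvCell g (R + 1) c ≠ bg then pvCell g (R + 1) c
  else if pvCell g R c ≠ bg ∧ nine + 1 < R then bg
  else pvCell g R c

def transform_alt (grid : List (List Int)) : List (List Int) :=
  let rows := grid.length
  let cols := (grid.getD 0 []).length
  match pvNineRow grid cols with
  | none => grid
  | some nine =>
    let bg := pvBg grid
    (List.range rows).map (fun R =>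
      if R < nine then (List.range cols).map (fun c => pvUpperCell grid bg nine R c)
      else if R = nine then grid.getD R []
      else (List.range cols).map (fun c => pvLowerCell grid bg nine rows R c))

-- ===== PRECONDITION & SPEC =====
-- Pre_ admits non-empty grids that are either rectangular (the natural domain; excluding the
-- all-9-divider-with-only-9s grids, on which A raises IndexError on the empty Counter, as on the
-- empty grid) or have a non-9 among every row's first len(grid[0]) entries (the divider scan then
-- returns None and A returns the grid unchanged); other ragged grids are excluded, since A indexes
-- every row by the first row's width and may raise or silently keep a row's surplus entries.
def Pre_transform (grid : List (List Int)) : Prop :=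
  grid ≠ [] ∧
  (((∀ row ∈ grid, row.length = (grid.headD []).length) ∧
    ((∃ row ∈ grid, ∀ v ∈ row, v = 9) → (∃ row ∈ grid, ∃ v ∈ row, v ≠ 9))) ∨
   (∀ row ∈ grid, ∃ v ∈ row.take (grid.headD []).length, v ≠ 9))
instance (grid : List (List Int)) : Decidable (Pre_transform grid) := by
  unfold Pre_transform; infer_instance

def pvWitness_transform : List (List Int) := [[1, 0], [0, 0], [9, 9], [0, 3], [0, 0]]

def Spec_transform (grid : List (List Int)) (out : List (List Int)) : Prop := out = transform_alt grid
instance (grid : List (List Int)) (out : List (List Int)) : Decidable (Spec_transform grid out) := by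
  unfold Spec_transform; infer_instance

-- ===== CLAIM (what is proved, stated in full; the proofs are below) =====
def Claim_equal_transform : Prop :=
  ∀ (grid : List (List Int)), Dom_transform grid → Pre_transform grid →
    Spec_transform grid (transform grid)

-- ===== LEMMAS AND PROOFS =====

-- shape: out has the same row/column layout as g
def pvSh (g out : List (List Int)) : Prop :=
  out.length = g.length ∧ ∀ R, (out.getD R []).length = (g.getD R []).length

theorem pvRow_set2d (out : List (List Int)) (r c : Nat) (v : Int) (R : Nat) :
    (pvSet2d out r c v).getD R [] =
      if R = r ∧ R < out.length then (out.getD R []).set c v else out.getD R [] := by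
  simp only [pvSet2d, List.getD_eq_getElem?_getD, List.getElem?_modify]
  by_cases hR : R < out.length
  · rw [List.getElem?_eq_getElem hR]
    by_cases h : R = r
    · subst h; simp [hR]
    · have hrR : r ≠ R := fun hh => h hh.symm
      simp [hrR]
      exact fun hh _ => absurd hh h
  · rw [List.getElem?_eq_none (by omega)]
    simp [hR]

theorem pvEntry_set (row : List Int) (c : Nat) (v : Int) (C : Nat) :
    (row.set c v).getD C 0 = if C = c ∧ c < row.length then v else row.getD C 0 := by
  simp only [List.getD_eq_getElem?_getD, List.getElem?_set]
  by_cases h : c = C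
  · subst h
    by_cases hc : c < row.length <;> simp [hc]
  · rw [if_neg h, if_neg (by rintro ⟨hh, _⟩; exact h hh.symm)]

theorem pvCell_set2d (out : List (List Int)) (r c : Nat) (v : Int) (R C : Nat) :
    pvCell (pvSet2d out r c v) R C =
      if R = r ∧ C = c ∧ r < out.length ∧ c < (out.getD r []).length then v
      else pvCell out R C := by
  unfold pvCell
  rw [pvRow_set2d]
  by_cases hR : R = r ∧ R < out.length
  · rw [if_pos hR]
    rw [pvEntry_set]
    rcases hR with ⟨h1, h2⟩
    subst h1
    by_cases hc : C = c ∧ c < (out.getD R []).length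
    · simp [hc.1, h2]
    · rw [if_neg hc, if_neg (by tauto)]
  · rw [if_neg hR, if_neg (by
      rintro ⟨h1, _, h3, _⟩
      exact hR ⟨h1, h1 ▸ h3⟩)]

theorem pvSh_set2d (g out : List (List Int)) (r c : Nat) (v : Int) (h : pvSh g out) :
    pvSh g (pvSet2d out r c v) := by
  obtain ⟨h1, h2⟩ := h
  refine ⟨by simp [pvSet2d, h1], fun R => ?_⟩
  rw [pvRow_set2d]
  split_ifs with h3
  · rw [List.length_set]; exact h2 R
  · exact h2 R

theorem pvSet2d_length (out : List (List Int)) (r c : Nat) (v : Int) :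
    (pvSet2d out r c v).length = out.length := by
  simp [pvSet2d]

theorem pvSet2d_row_length (out : List (List Int)) (r c : Nat) (v : Int) (R : Nat) :
    ((pvSet2d out r c v).getD R []).length = (out.getD R []).length := by
  rw [pvRow_set2d]
  split_ifs with h
  · rw [List.length_set]
  · rfl

-- value of cell (R,C) after the upper loop has processed rows nine-1 … n (n = nine: nothing yet)
def pvU (g : List (List Int)) (bg : Int) (nine cols n R C : Nat) : Int :=
  if n + 1 ≤ R ∧ R < nine ∧ C < cols ∧ pvCell g (R - 1) C ≠ bg then pvCell g (R - 1) C
  else if n ≤ R ∧ R < nine ∧ C < cols ∧ pvCell g R C ≠ bg ∧ R + 1 < nine then bg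
  else pvCell g R C

theorem pvUpInner (g : List (List Int)) (bg : Int) (nine cols r : Nat)
    (hnine : nine < g.length)
    (hlen : ∀ R, R < g.length → (g.getD R []).length = cols)
    (out : List (List Int)) (moved : List (Nat × Nat))
    (hsh : pvSh g out) (hmv : ∀ p ∈ moved, r + 1 ≤ p.1) :
    ∀ (m : Nat), m ≤ cols →
      pvSh g ((List.range m).foldl (pvUpStep g bg nine r) (out, moved)).1 ∧
      (∀ p ∈ ((List.range m).foldl (pvUpStep g bg nine r) (out, moved)).2, r + 1 ≤ p.1) ∧
      (∀ R C, pvCell ((List.range m).foldl (pvUpStep g bg nine r) (out, moved)).1 R C =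
        if C < m ∧ r + 1 < nine ∧ pvCell g r C ≠ bg then
          (if R = r + 1 then pvCell g r C else if R = r then bg else pvCell out R C)
        else pvCell out R C) := by
  intro m
  induction m with
  | zero =>
    intro _
    refine ⟨hsh, hmv, fun R C => ?_⟩
    simp
  | succ m ih =>
    intro hm
    obtain ⟨ihsh, ihmv, ihchar⟩ := ih (by omega)
    rw [List.range_succ, List.foldl_append]
    set st := (List.range m).foldl (pvUpStep g bg nine r) (out, moved) with hst
    simp only [List.foldl_cons, List.foldl_nil]
    have hnotin : (r, m) ∉ st.2 := fun hin => by
      have h : r + 1 ≤ r := ihmv (r, m) hin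
      omega
    by_cases hgb : pvCell g r m = bg
    · have hstep : pvUpStep g bg nine r st m = st := by
        unfold pvUpStep
        rw [if_neg (by rintro ⟨h1, _⟩; exact h1 hgb)]
      rw [hstep]
      refine ⟨ihsh, ihmv, fun R C => ?_⟩
      rw [ihchar R C]
      by_cases hx : C < m + 1 ∧ r + 1 < nine ∧ pvCell g r C ≠ bg
      · have hcm : C < m := by
          obtain ⟨h1, _, h3⟩ := hx
          rcases Nat.lt_or_ge C m with h | h
          · exact h
          · exfalso
            have hcem : C = m := by omega
            rw [hcem] at h3; exact h3 hgb
        have hxm : C < m ∧ r + 1 < nine ∧ pvCell g r C ≠ bg := ⟨hcm, hx.2⟩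
        rw [if_pos hxm, if_pos hx]
      · have hx' : ¬(C < m ∧ r + 1 < nine ∧ pvCell g r C ≠ bg) := by
          rintro ⟨h1, h2⟩; exact hx ⟨by omega, h2⟩
        rw [if_neg hx', if_neg hx]
    · by_cases hlt : r + 1 < nine
      · have hstep : pvUpStep g bg nine r st m =
            (pvSet2d (pvSet2d st.1 (r + 1) m (pvCell g r m)) r m bg,
              PySem.Set.add st.2 (r + 1, m)) := by
          unfold pvUpStep
          rw [if_pos ⟨hgb, hnotin⟩, if_pos hlt, if_pos hnotin]
        rw [hstep]
        have hsh1 : pvSh g (pvSet2d st.1 (r + 1) m (pvCell g r m)) := pvSh_set2d _ _ _ _ _ ihsh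
        have hL1 : (pvSet2d st.1 (r + 1) m (pvCell g r m)).length = g.length := by
          rw [pvSet2d_length]; exact ihsh.1
        have hR1 : ((pvSet2d st.1 (r + 1) m (pvCell g r m)).getD r []).length = cols := by
          rw [pvSet2d_row_length, ihsh.2 r]; exact hlen r (by omega)
        have hL2 : st.1.length = g.length := ihsh.1
        have hR2 : (st.1.getD (r + 1) []).length = cols := by
          rw [ihsh.2 (r + 1)]; exact hlen (r + 1) (by omega)
        refine ⟨pvSh_set2d _ _ _ _ _ hsh1, ?_, fun R C => ?_⟩
        · intro p hp
          rcases (PySem.Set.mem_add _ _ _).1 hp with h | h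
          · exact ihmv p h
          · subst h; simp
        · rw [pvCell_set2d, pvCell_set2d]
          by_cases hc : C = m
          · subst hc
            by_cases hRr : R = r
            · subst hRr
              rw [if_pos ⟨rfl, rfl, by rw [hL1]; omega, by rw [hR1]; omega⟩,
                  if_pos ⟨by omega, hlt, hgb⟩, if_neg (by omega), if_pos rfl]
            · rw [if_neg (by rintro ⟨h1, _⟩; exact hRr h1)]
              by_cases hRr1 : R = r + 1
              · subst hRr1
                rw [if_pos ⟨rfl, rfl, by rw [hL2]; omega, by rw [hR2]; omega⟩,
                    if_pos ⟨by omega, hlt, hgb⟩, if_pos rfl]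
              · rw [if_neg (by rintro ⟨h1, _⟩; exact hRr1 h1), ihchar R C,
                    if_neg (by rintro ⟨h1, _⟩; omega),
                    if_pos ⟨by omega, hlt, hgb⟩, if_neg hRr1, if_neg hRr]
          · rw [if_neg (by rintro ⟨_, h2, _⟩; exact hc h2),
                if_neg (by rintro ⟨_, h2, _⟩; exact hc h2), ihchar R C]
            by_cases hx : C < m + 1 ∧ r + 1 < nine ∧ pvCell g r C ≠ bg
            · obtain ⟨h1, h2⟩ := hx
              have hxm : C < m ∧ r + 1 < nine ∧ pvCell g r C ≠ bg := ⟨by omega, h2⟩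
              rw [if_pos hxm, if_pos (⟨h1, h2⟩ : C < m + 1 ∧ r + 1 < nine ∧ pvCell g r C ≠ bg)]
            · have hx' : ¬(C < m ∧ r + 1 < nine ∧ pvCell g r C ≠ bg) := by
                rintro ⟨h1, h2⟩; exact hx ⟨by omega, h2⟩
              rw [if_neg hx', if_neg hx]
      · have hstep : pvUpStep g bg nine r st m = st := by
          unfold pvUpStep
          rw [if_pos ⟨hgb, hnotin⟩, if_neg hlt]
        rw [hstep]
        refine ⟨ihsh, ihmv, fun R C => ?_⟩
        rw [ihchar R C,
            if_neg (by rintro ⟨_, h2, _⟩; exact hlt h2),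
            if_neg (by rintro ⟨_, h2, _⟩; exact hlt h2)]

theorem pvU_init (g : List (List Int)) (bg : Int) (nine cols R C : Nat) :
    pvU g bg nine cols nine R C = pvCell g R C := by
  unfold pvU
  rw [if_neg (by rintro ⟨h1, h2, _⟩; omega), if_neg (by rintro ⟨h1, h2, _⟩; omega)]

theorem pvU_step (g : List (List Int)) (bg : Int) (nine cols n : Nat) (hn : n < nine)
    (R C : Nat) :
    (if C < cols ∧ n + 1 < nine ∧ pvCell g n C ≠ bg then
       (if R = n + 1 then pvCell g n C else if R = n then bg
        else pvU g bg nine cols (n + 1) R C)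
     else pvU g bg nine cols (n + 1) R C) = pvU g bg nine cols n R C := by
  have hR : R < n ∨ R = n ∨ R = n + 1 ∨ n + 2 ≤ R := by omega
  rcases hR with hR | hR | hR | hR
  · rw [if_neg (show ¬R = n + 1 by omega), if_neg (show ¬R = n by omega), ite_self]
    unfold pvU
    rw [if_neg (by rintro ⟨h1, _⟩; omega), if_neg (by rintro ⟨h1, _⟩; omega),
        if_neg (by rintro ⟨h1, _⟩; omega), if_neg (by rintro ⟨h1, _⟩; omega)]
  · rw [hR]
    by_cases hc : C < cols ∧ n + 1 < nine ∧ pvCell g n C ≠ bg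
    · rw [if_pos hc, if_neg (show ¬n = n + 1 by omega), if_pos rfl]
      unfold pvU
      rw [if_neg (by rintro ⟨h1, _⟩; omega),
          if_pos ⟨le_refl n, hn, hc.1, hc.2.2, hc.2.1⟩]
    · rw [if_neg hc]
      unfold pvU
      rw [if_neg (by rintro ⟨h1, _⟩; omega), if_neg (by rintro ⟨h1, _⟩; omega),
          if_neg (by rintro ⟨h1, _⟩; omega),
          if_neg (by rintro ⟨h1, h2, h3, h4, h5⟩; exact hc ⟨h3, h5, h4⟩)]
  · rw [hR]
    by_cases hc : C < cols ∧ n + 1 < nine ∧ pvCell g n C ≠ bg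
    · rw [if_pos hc, if_pos rfl]
      unfold pvU
      simp only [Nat.add_sub_cancel]
      rw [if_pos ⟨le_refl (n + 1), hc.2.1, hc.1, hc.2.2⟩]
    · rw [if_neg hc]
      unfold pvU
      simp only [Nat.add_sub_cancel]
      by_cases h2 : n + 1 < nine ∧ C < cols ∧ pvCell g (n + 1) C ≠ bg ∧ n + 1 + 1 < nine
      · rw [if_neg (by rintro ⟨h1, _⟩; omega), if_pos ⟨le_refl (n + 1), h2⟩,
            if_neg (by rintro ⟨h1, ha, hb, hcn⟩; exact hc ⟨hb, ha, hcn⟩),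
            if_pos ⟨by omega, h2⟩]
      · rw [if_neg (by rintro ⟨h1, _⟩; omega),
            if_neg (by rintro ⟨h1, hr⟩; exact h2 hr),
            if_neg (by rintro ⟨h1, ha, hb, hcn⟩; exact hc ⟨hb, ha, hcn⟩),
            if_neg (by rintro ⟨h1, hr⟩; exact h2 hr)]
  · rw [if_neg (show ¬R = n + 1 by omega), if_neg (show ¬R = n by omega), ite_self]
    unfold pvU
    by_cases h1 : R < nine ∧ C < cols ∧ pvCell g (R - 1) C ≠ bg
    · rw [if_pos ⟨by omega, h1⟩, if_pos ⟨by omega, h1⟩]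
    · by_cases h2 : R < nine ∧ C < cols ∧ pvCell g R C ≠ bg ∧ R + 1 < nine
      · rw [if_neg (by rintro ⟨ha, hr⟩; exact h1 hr), if_pos ⟨by omega, h2⟩,
            if_neg (by rintro ⟨ha, hr⟩; exact h1 hr), if_pos ⟨by omega, h2⟩]
      · rw [if_neg (by rintro ⟨ha, hr⟩; exact h1 hr),
            if_neg (by rintro ⟨ha, hr⟩; exact h2 hr),
            if_neg (by rintro ⟨ha, hr⟩; exact h1 hr),
            if_neg (by rintro ⟨ha, hr⟩; exact h2 hr)]

theorem pvUpOuter (g : List (List Int)) (bg : Int) (nine cols : Nat)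
    (hnine : nine < g.length)
    (hlen : ∀ R, R < g.length → (g.getD R []).length = cols) :
    ∀ (n : Nat), n ≤ nine → ∀ (out : List (List Int)) (moved : List (Nat × Nat)),
      pvSh g out → (∀ p ∈ moved, n ≤ p.1) →
      (∀ R C, pvCell out R C = pvU g bg nine cols n R C) →
      pvSh g (((List.range n).reverse.foldl
        (fun st r => (List.range cols).foldl (pvUpStep g bg nine r) st) (out, moved)).1) ∧
      (∀ R C, pvCell (((List.range n).reverse.foldl
        (fun st r => (List.range cols).foldl (pvUpStep g bg nine r) st) (out, moved)).1) R C =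
        pvU g bg nine cols 0 R C) := by
  intro n
  induction n with
  | zero =>
    intro _ out moved hsh hmv hchar
    simp only [List.range_zero, List.reverse_nil, List.foldl_nil]
    exact ⟨hsh, hchar⟩
  | succ n ih =>
    intro hn out moved hsh hmv hchar
    rw [List.range_succ, List.reverse_append, List.reverse_cons, List.reverse_nil,
        List.nil_append, List.cons_append, List.nil_append, List.foldl_cons]
    obtain ⟨ish, imv, ichar⟩ :=
      pvUpInner g bg nine cols n hnine hlen out moved hsh hmv cols (le_refl cols)
    have hpair : (List.range cols).foldl (pvUpStep g bg nine n) (out, moved) =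
        (((List.range cols).foldl (pvUpStep g bg nine n) (out, moved)).1,
         ((List.range cols).foldl (pvUpStep g bg nine n) (out, moved)).2) := rfl
    rw [hpair]
    apply ih (by omega)
    · exact ish
    · intro p hp; have := imv p hp; omega
    · intro R C
      rw [ichar R C]
      have hstep := pvU_step g bg nine cols n (by omega) R C
      rw [← hstep]
      by_cases hc : C < cols ∧ n + 1 < nine ∧ pvCell g n C ≠ bg
      · rw [if_pos hc, if_pos hc]
        by_cases h1 : R = n + 1
        · rw [if_pos h1, if_pos h1]
        · rw [if_neg h1, if_neg h1]
          by_cases h2 : R = n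
          · rw [if_pos h2, if_pos h2]
          · rw [if_neg h2, if_neg h2, hchar R C]
      · rw [if_neg hc, if_neg hc, hchar R C]

-- value of cell (R,C) after the lower loop has processed rows nine+1 … m-1 over base b
def pvL (g : List (List Int)) (bg : Int) (nine cols : Nat) (b : Nat → Nat → Int)
    (m R C : Nat) : Int :=
  if nine < R ∧ R + 1 < m ∧ C < cols ∧ pvCell g (R + 1) C ≠ bg then pvCell g (R + 1) C
  else if nine + 1 < R ∧ R < m ∧ C < cols ∧ pvCell g R C ≠ bg then bg
  else b R C

theorem pvL_init (g : List (List Int)) (bg : Int) (nine cols : Nat) (b : Nat → Nat → Int)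
    (R C : Nat) : pvL g bg nine cols b (nine + 1) R C = b R C := by
  unfold pvL
  rw [if_neg (by rintro ⟨h1, h2, _⟩; omega), if_neg (by rintro ⟨h1, h2, _⟩; omega)]

theorem pvLoInner (g : List (List Int)) (bg : Int) (nine cols r : Nat)
    (hr1 : nine + 1 ≤ r) (hr2 : r < g.length)
    (hlen : ∀ R, R < g.length → (g.getD R []).length = cols)
    (out : List (List Int)) (moved : List (Nat × Nat))
    (hsh : pvSh g out) (hmv : ∀ p ∈ moved, p.1 < r) :
    ∀ (m : Nat), m ≤ cols →
      pvSh g ((List.range m).foldl (pvLoStep g bg nine r) (out, moved)).1 ∧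
      (∀ p ∈ ((List.range m).foldl (pvLoStep g bg nine r) (out, moved)).2, p.1 < r) ∧
      (∀ R C, pvCell ((List.range m).foldl (pvLoStep g bg nine r) (out, moved)).1 R C =
        if C < m ∧ nine < r - 1 ∧ pvCell g r C ≠ bg then
          (if R = r - 1 then pvCell g r C else if R = r then bg else pvCell out R C)
        else pvCell out R C) := by
  intro m
  induction m with
  | zero =>
    intro _
    refine ⟨hsh, hmv, fun R C => ?_⟩
    simp
  | succ m ih =>
    intro hm
    obtain ⟨ihsh, ihmv, ihchar⟩ := ih (by omega)
    rw [List.range_succ, List.foldl_append]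
    set st := (List.range m).foldl (pvLoStep g bg nine r) (out, moved) with hst
    simp only [List.foldl_cons, List.foldl_nil]
    have hnotin : (r, m) ∉ st.2 := fun hin => by
      have h : (r, m).1 < r := ihmv (r, m) hin
      simp at h
    by_cases hgb : pvCell g r m = bg
    · have hstep : pvLoStep g bg nine r st m = st := by
        unfold pvLoStep
        rw [if_neg (by rintro ⟨h1, _⟩; exact h1 hgb)]
      rw [hstep]
      refine ⟨ihsh, ihmv, fun R C => ?_⟩
      rw [ihchar R C]
      by_cases hx : C < m + 1 ∧ nine < r - 1 ∧ pvCell g r C ≠ bg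
      · have hcm : C < m := by
          obtain ⟨h1, _, h3⟩ := hx
          rcases Nat.lt_or_ge C m with h | h
          · exact h
          · exfalso
            have hcem : C = m := by omega
            rw [hcem] at h3; exact h3 hgb
        have hxm : C < m ∧ nine < r - 1 ∧ pvCell g r C ≠ bg := ⟨hcm, hx.2⟩
        rw [if_pos hxm, if_pos hx]
      · have hx' : ¬(C < m ∧ nine < r - 1 ∧ pvCell g r C ≠ bg) := by
          rintro ⟨h1, h2⟩; exact hx ⟨by omega, h2⟩
        rw [if_neg hx', if_neg hx]
    · by_cases hlt : nine < r - 1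
      · have hstep : pvLoStep g bg nine r st m =
            (pvSet2d (pvSet2d st.1 (r - 1) m (pvCell g r m)) r m bg,
              PySem.Set.add st.2 (r - 1, m)) := by
          unfold pvLoStep
          rw [if_pos ⟨hgb, hnotin⟩, if_pos hlt, if_pos hnotin]
        rw [hstep]
        have hsh1 : pvSh g (pvSet2d st.1 (r - 1) m (pvCell g r m)) := pvSh_set2d _ _ _ _ _ ihsh
        have hL1 : (pvSet2d st.1 (r - 1) m (pvCell g r m)).length = g.length := by
          rw [pvSet2d_length]; exact ihsh.1
        have hR1 : ((pvSet2d st.1 (r - 1) m (pvCell g r m)).getD r []).length = cols := by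
          rw [pvSet2d_row_length, ihsh.2 r]; exact hlen r hr2
        have hL2 : st.1.length = g.length := ihsh.1
        have hR2 : (st.1.getD (r - 1) []).length = cols := by
          rw [ihsh.2 (r - 1)]; exact hlen (r - 1) (by omega)
        refine ⟨pvSh_set2d _ _ _ _ _ hsh1, ?_, fun R C => ?_⟩
        · intro p hp
          rcases (PySem.Set.mem_add _ _ _).1 hp with h | h
          · exact ihmv p h
          · subst h; simp; omega
        · rw [pvCell_set2d, pvCell_set2d]
          by_cases hc : C = m
          · subst hc
            by_cases hRr : R = r
            · subst hRr
              rw [if_pos ⟨rfl, rfl, by rw [hL1]; omega, by rw [hR1]; omega⟩,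
                  if_pos ⟨by omega, hlt, hgb⟩, if_neg (by omega), if_pos rfl]
            · rw [if_neg (by rintro ⟨h1, _⟩; exact hRr h1)]
              by_cases hRr1 : R = r - 1
              · subst hRr1
                rw [if_pos ⟨rfl, rfl, by rw [hL2]; omega, by rw [hR2]; omega⟩,
                    if_pos ⟨by omega, hlt, hgb⟩, if_pos rfl]
              · rw [if_neg (by rintro ⟨h1, _⟩; exact hRr1 h1), ihchar R C,
                    if_neg (by rintro ⟨h1, _⟩; omega),
                    if_pos ⟨by omega, hlt, hgb⟩, if_neg hRr1, if_neg hRr]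
          · rw [if_neg (by rintro ⟨_, h2, _⟩; exact hc h2),
                if_neg (by rintro ⟨_, h2, _⟩; exact hc h2), ihchar R C]
            by_cases hx : C < m + 1 ∧ nine < r - 1 ∧ pvCell g r C ≠ bg
            · obtain ⟨h1, h2⟩ := hx
              have hxm : C < m ∧ nine < r - 1 ∧ pvCell g r C ≠ bg := ⟨by omega, h2⟩
              rw [if_pos hxm, if_pos (⟨h1, h2⟩ : C < m + 1 ∧ nine < r - 1 ∧ pvCell g r C ≠ bg)]
            · have hx' : ¬(C < m ∧ nine < r - 1 ∧ pvCell g r C ≠ bg) := by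
                rintro ⟨h1, h2⟩; exact hx ⟨by omega, h2⟩
              rw [if_neg hx', if_neg hx]
      · have hstep : pvLoStep g bg nine r st m = st := by
          unfold pvLoStep
          rw [if_pos ⟨hgb, hnotin⟩, if_neg hlt]
        rw [hstep]
        refine ⟨ihsh, ihmv, fun R C => ?_⟩
        rw [ihchar R C,
            if_neg (by rintro ⟨_, h2, _⟩; exact hlt h2),
            if_neg (by rintro ⟨_, h2, _⟩; exact hlt h2)]

theorem pvL_step (g : List (List Int)) (bg : Int) (nine cols : Nat) (b : Nat → Nat → Int)
    (m : Nat) (hm : nine + 1 ≤ m) (R C : Nat) :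
    (if C < cols ∧ nine < m - 1 ∧ pvCell g m C ≠ bg then
       (if R = m - 1 then pvCell g m C else if R = m then bg
        else pvL g bg nine cols b m R C)
     else pvL g bg nine cols b m R C) = pvL g bg nine cols b (m + 1) R C := by
  obtain ⟨m', rfl⟩ : ∃ m', m = m' + 1 := ⟨m - 1, by omega⟩
  simp only [Nat.add_sub_cancel]
  have hR : R < m' ∨ R = m' ∨ R = m' + 1 ∨ m' + 2 ≤ R := by omega
  rcases hR with hR | hR | hR | hR
  · rw [if_neg (show ¬R = m' by omega), if_neg (show ¬R = m' + 1 by omega), ite_self]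
    unfold pvL
    by_cases h1 : nine < R ∧ C < cols ∧ pvCell g (R + 1) C ≠ bg
    · rw [if_pos ⟨h1.1, by omega, h1.2⟩, if_pos ⟨h1.1, by omega, h1.2⟩]
    · by_cases h2 : nine + 1 < R ∧ C < cols ∧ pvCell g R C ≠ bg
      · rw [if_neg (by rintro ⟨ha, hb, hr⟩; exact h1 ⟨ha, hr⟩),
            if_pos ⟨h2.1, by omega, h2.2⟩,
            if_neg (by rintro ⟨ha, hb, hr⟩; exact h1 ⟨ha, hr⟩),
            if_pos ⟨h2.1, by omega, h2.2⟩]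
      · rw [if_neg (by rintro ⟨ha, hb, hr⟩; exact h1 ⟨ha, hr⟩),
            if_neg (by rintro ⟨ha, hb, hr⟩; exact h2 ⟨ha, hr⟩),
            if_neg (by rintro ⟨ha, hb, hr⟩; exact h1 ⟨ha, hr⟩),
            if_neg (by rintro ⟨ha, hb, hr⟩; exact h2 ⟨ha, hr⟩)]
  · rw [hR]
    by_cases hc : C < cols ∧ nine < m' ∧ pvCell g (m' + 1) C ≠ bg
    · rw [if_pos hc, if_pos rfl]
      unfold pvL
      rw [if_pos ⟨hc.2.1, by omega, hc.1, hc.2.2⟩]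
    · rw [if_neg hc]
      unfold pvL
      by_cases h2 : nine + 1 < m' ∧ C < cols ∧ pvCell g m' C ≠ bg
      · rw [if_neg (by rintro ⟨_, hb, _⟩; omega), if_pos ⟨h2.1, by omega, h2.2⟩,
            if_neg (by rintro ⟨ha, hb, hcc, hd⟩; exact hc ⟨hcc, ha, hd⟩),
            if_pos ⟨h2.1, by omega, h2.2⟩]
      · rw [if_neg (by rintro ⟨_, hb, _⟩; omega),
            if_neg (by rintro ⟨ha, hb, hcc, hd⟩; exact h2 ⟨ha, hcc, hd⟩),
            if_neg (by rintro ⟨ha, hb, hcc, hd⟩; exact hc ⟨hcc, ha, hd⟩),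
            if_neg (by rintro ⟨ha, hb, hcc, hd⟩; exact h2 ⟨ha, hcc, hd⟩)]
  · rw [hR]
    by_cases hc : C < cols ∧ nine < m' ∧ pvCell g (m' + 1) C ≠ bg
    · rw [if_pos hc, if_neg (show ¬m' + 1 = m' by omega), if_pos rfl]
      unfold pvL
      rw [if_neg (by rintro ⟨_, hb, _⟩; omega),
          if_pos ⟨by omega, by omega, hc.1, hc.2.2⟩]
    · rw [if_neg hc]
      unfold pvL
      rw [if_neg (by rintro ⟨_, hb, _⟩; omega), if_neg (by rintro ⟨_, hb, _⟩; omega),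
          if_neg (by rintro ⟨_, hb, _⟩; omega),
          if_neg (by rintro ⟨ha, hb, hcc, hd⟩; exact hc ⟨hcc, by omega, hd⟩)]
  · rw [if_neg (show ¬R = m' by omega), if_neg (show ¬R = m' + 1 by omega), ite_self]
    unfold pvL
    rw [if_neg (by rintro ⟨_, hb, _⟩; omega), if_neg (by rintro ⟨_, hb, _⟩; omega),
        if_neg (by rintro ⟨_, hb, _⟩; omega), if_neg (by rintro ⟨_, hb, _⟩; omega)]

theorem pvLoOuter (g : List (List Int)) (bg : Int) (nine cols : Nat) (b : Nat → Nat → Int)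
    (hlen : ∀ R, R < g.length → (g.getD R []).length = cols) :
    ∀ (k m : Nat), nine + 1 ≤ m → m + k ≤ g.length →
      ∀ (out : List (List Int)) (moved : List (Nat × Nat)),
      pvSh g out → (∀ p ∈ moved, p.1 < m) →
      (∀ R C, pvCell out R C = pvL g bg nine cols b m R C) →
      pvSh g (((List.range' m k).foldl
        (fun st r => (List.range cols).foldl (pvLoStep g bg nine r) st) (out, moved)).1) ∧
      (∀ R C, pvCell (((List.range' m k).foldl
        (fun st r => (List.range cols).foldl (pvLoStep g bg nine r) st) (out, moved)).1) R C =
        pvL g bg nine cols b (m + k) R C) := by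
  intro k
  induction k with
  | zero =>
    intro m hm1 hm2 out moved hsh hmv hchar
    simp only [List.range'_zero, List.foldl_nil, Nat.add_zero]
    exact ⟨hsh, hchar⟩
  | succ k ih =>
    intro m hm1 hm2 out moved hsh hmv hchar
    rw [List.range'_succ, List.foldl_cons]
    obtain ⟨ish, imv, ichar⟩ :=
      pvLoInner g bg nine cols m hm1 (by omega) hlen out moved hsh hmv cols (le_refl cols)
    have hpair : (List.range cols).foldl (pvLoStep g bg nine m) (out, moved) =
        (((List.range cols).foldl (pvLoStep g bg nine m) (out, moved)).1,
         ((List.range cols).foldl (pvLoStep g bg nine m) (out, moved)).2) := rfl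
    rw [hpair]
    have hres := ih (m + 1) (by omega) (by omega)
      ((List.range cols).foldl (pvLoStep g bg nine m) (out, moved)).1
      ((List.range cols).foldl (pvLoStep g bg nine m) (out, moved)).2
      ish (fun p hp => by have := imv p hp; omega)
      (fun R C => by
        rw [ichar R C, ← pvL_step g bg nine cols b m hm1 R C]
        by_cases hc : C < cols ∧ nine < m - 1 ∧ pvCell g m C ≠ bg
        · rw [if_pos hc, if_pos hc]
          by_cases h1 : R = m - 1
          · rw [if_pos h1, if_pos h1]
          · rw [if_neg h1, if_neg h1]
            by_cases h2 : R = m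
            · rw [if_pos h2, if_pos h2]
            · rw [if_neg h2, if_neg h2, hchar R C]
        · rw [if_neg hc, if_neg hc, hchar R C])
    have harr : m + 1 + k = m + (k + 1) := by omega
    rw [harr] at hres
    exact hres

theorem pvNineRow_none (g : List (List Int)) (cols : Nat)
    (h : ∀ row ∈ g, ∃ v ∈ row.take cols, v ≠ 9) : pvNineRow g cols = none := by
  unfold pvNineRow
  rw [List.find?_eq_none]
  intro r hr
  rw [List.mem_range] at hr
  have hrow : g.getD r [] ∈ g := by
    rw [List.getD_eq_getElem g [] hr]; exact List.getElem_mem hr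
  obtain ⟨v, hv, hv9⟩ := h _ hrow
  obtain ⟨cc, hc, hceq⟩ := List.getElem_of_mem hv
  have hclen : cc < (g.getD r []).length := by
    have h2 := hc; rw [List.length_take] at h2; omega
  have hccols : cc < cols := by
    have h2 := hc; rw [List.length_take] at h2; omega
  rw [List.getElem_take] at hceq
  intro hall
  rw [List.all_eq_true] at hall
  have h9 := hall cc (List.mem_range.mpr hccols)
  have hvq : pvCell g r cc = v := by
    unfold pvCell; rw [List.getD_eq_getElem _ 0 hclen, hceq]
  rw [hvq] at h9
  exact hv9 (by exact_mod_cast (beq_iff_eq.mp h9))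

theorem pvFinal_upper (g : List (List Int)) (bg : Int) (nine cols rows i C : Nat)
    (hi : i < nine) (hC : C < cols) :
    pvL g bg nine cols (pvU g bg nine cols 0) rows i C = pvUpperCell g bg nine i C := by
  unfold pvL
  rw [if_neg (by rintro ⟨h, _⟩; omega), if_neg (by rintro ⟨h, _⟩; omega)]
  unfold pvU pvUpperCell
  by_cases h1 : 1 ≤ i ∧ pvCell g (i - 1) C ≠ bg
  · rw [if_pos ⟨h1.1, hi, hC, h1.2⟩, if_pos h1]
  · rw [if_neg (by rintro ⟨a, b, cc, d⟩; exact h1 ⟨a, d⟩), if_neg h1]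
    by_cases h2 : pvCell g i C ≠ bg ∧ i + 1 < nine
    · rw [if_pos ⟨by omega, hi, hC, h2.1, h2.2⟩, if_pos h2]
    · rw [if_neg (by rintro ⟨a, b, cc, d, e⟩; exact h2 ⟨d, e⟩), if_neg h2]

theorem pvFinal_nine (g : List (List Int)) (bg : Int) (nine cols rows C : Nat) :
    pvL g bg nine cols (pvU g bg nine cols 0) rows nine C = pvCell g nine C := by
  unfold pvL
  rw [if_neg (by rintro ⟨h, _⟩; omega), if_neg (by rintro ⟨h, _⟩; omega)]
  unfold pvU
  rw [if_neg (by rintro ⟨_, h, _⟩; omega), if_neg (by rintro ⟨_, h, _⟩; omega)]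

theorem pvFinal_lower (g : List (List Int)) (bg : Int) (nine cols rows i C : Nat)
    (hi : nine < i) (hirows : i < rows) (hC : C < cols) :
    pvL g bg nine cols (pvU g bg nine cols 0) rows i C = pvLowerCell g bg nine rows i C := by
  unfold pvL pvLowerCell pvU
  by_cases h1 : i + 1 < rows ∧ pvCell g (i + 1) C ≠ bg
  · rw [if_pos ⟨hi, h1.1, hC, h1.2⟩, if_pos h1]
  · rw [if_neg (by rintro ⟨a, b, cc, d⟩; exact h1 ⟨b, d⟩), if_neg h1]
    by_cases h2 : pvCell g i C ≠ bg ∧ nine + 1 < i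
    · rw [if_pos ⟨h2.2, hirows, hC, h2.1⟩, if_pos h2]
    · rw [if_neg (by rintro ⟨a, b, cc, d⟩; exact h2 ⟨d, a⟩), if_neg h2,
          if_neg (by rintro ⟨_, h, _⟩; omega), if_neg (by rintro ⟨_, h, _⟩; omega)]

theorem pvCell_getElem (l : List (List Int)) (i C : Nat) (h1 : i < l.length)
    (h2 : C < l[i].length) : l[i][C] = pvCell l i C := by
  unfold pvCell
  rw [List.getD_eq_getElem l [] h1, List.getD_eq_getElem l[i] 0 h2]

-- ===== VERDICT (by name: the statement is the Claim_ definition above) =====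
theorem transform_spec : Claim_equal_transform := by
  unfold Claim_equal_transform Spec_transform
  intro grid _ hpre
  obtain ⟨hne, hdisj⟩ := hpre
  cases hfind : pvNineRow grid ((grid.getD 0 []).length) with
  | none => simp only [transform, transform_alt, hfind]
  | some nine =>
    have hhead0 : grid.headD [] = grid.getD 0 [] := by
      cases grid with
      | nil => exact absurd rfl hne
      | cons a l => rfl
    have hrect : ∀ row ∈ grid, row.length = (grid.headD []).length := by
      rcases hdisj with ⟨hr, _⟩ | hsafe
      · exact hr
      · exfalso
        have hnonef : pvNineRow grid ((grid.getD 0 []).length) = none := by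
          apply pvNineRow_none
          intro row hrow
          have hs := hsafe row hrow
          rwa [hhead0] at hs
        rw [hnonef] at hfind
        simp at hfind
    simp only [transform, transform_alt, hfind]
    set cols := (grid.getD 0 []).length with hcols
    set bg := pvBg grid with hbg
    have hnine : nine < grid.length := by
      have hmem := List.mem_of_find?_eq_some (by unfold pvNineRow at hfind; exact hfind)
      simpa using hmem
    have hhead : grid.headD [] = grid.getD 0 [] := hhead0
    have hlen : ∀ R, R < grid.length → (grid.getD R []).length = cols := by
      intro R hR
      rw [List.getD_eq_getElem grid [] hR, hrect grid[R] (List.getElem_mem hR), hhead]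
    have hmap : (grid.map fun row => row) = grid := by simp
    rw [hmap]
    obtain ⟨sh1, char1⟩ := pvUpOuter grid bg nine cols hnine hlen nine (le_refl nine)
      grid [] ⟨rfl, fun R => rfl⟩ (by intro p hp; simp at hp)
      (fun R C => (pvU_init grid bg nine cols R C).symm)
    obtain ⟨sh2, char2⟩ := pvLoOuter grid bg nine cols (pvU grid bg nine cols 0) hlen
      (grid.length - (nine + 1)) (nine + 1) (le_refl (nine + 1)) (by omega)
      (((List.range nine).reverse.foldl
        (fun st r => (List.range cols).foldl (pvUpStep grid bg nine r) st)
        (grid, ([] : List (Nat × Nat)))).1) [] sh1 (by intro p hp; simp at hp)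
      (fun R C => by
        rw [char1 R C]
        exact (pvL_init grid bg nine cols (pvU grid bg nine cols 0) R C).symm)
    have hk : nine + 1 + (grid.length - (nine + 1)) = grid.length := by omega
    rw [hk] at char2
    apply List.ext_getElem
    · rw [sh2.1]; simp
    · intro i h1 h2
      have hirows : i < grid.length := by simpa using h2
      rw [List.getElem_map, List.getElem_range]
      have hrowlen :
          (((List.range' (nine + 1) (grid.length - (nine + 1))).foldl
            (fun st r => (List.range cols).foldl (pvLoStep grid bg nine r) st)
            ((((List.range nine).reverse.foldl
              (fun st r => (List.range cols).foldl (pvUpStep grid bg nine r) st)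
              (grid, ([] : List (Nat × Nat)))).1), ([] : List (Nat × Nat)))).1)[i].length
            = cols := by
        rw [← List.getD_eq_getElem _ [] h1, sh2.2 i]
        exact hlen i hirows
      by_cases hcase : i < nine
      · rw [if_pos hcase]
        apply List.ext_getElem
        · rw [hrowlen]; simp
        · intro C hC1 hC2
          have hCc : C < cols := by simpa using hC2
          rw [List.getElem_map, List.getElem_range, pvCell_getElem _ i C h1 hC1,
              char2 i C, pvFinal_upper grid bg nine cols grid.length i C hcase hCc]
      · by_cases hcase2 : i = nine
        · rw [if_neg hcase, if_pos hcase2]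
          subst hcase2
          apply List.ext_getElem
          · rw [hrowlen]; exact (hlen i hirows).symm
          · intro C hC1 hC2
            have hCc : C < (grid.getD i []).length := hC2
            rw [pvCell_getElem _ i C h1 hC1, char2 i C, pvFinal_nine]
            unfold pvCell
            rw [List.getD_eq_getElem (grid.getD i []) 0 hCc]
        · rw [if_neg hcase, if_neg hcase2]
          apply List.ext_getElem
          · rw [hrowlen]; simp
          · intro C hC1 hC2
            have hCc : C < cols := by simpa using hC2
            rw [List.getElem_map, List.getElem_range, pvCell_getElem _ i C h1 hC1,
                char2 i C,
                pvFinal_lower grid bg nine cols grid.length i C (by omega) hirows hCc]
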